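-- pv_equiv track=rewrite | github.com/SubDark1/Silver-hand | silverhand/cli.py | _is_valid_target
-- ===== SOURCE A (Python) =====
-- def _is_valid_target(target: str) -> bool:
--     """Validate target format"""
--     # Simple validation for IP, domain, or URL
--     if target.startswith(('http://', 'https://')):
--         return True
--
--     # IP validation
--     parts = target.split('.')
--     if len(parts) == 4 and all(part.isdigit() and 0 <= int(part) <= 255 for part in parts):
--         return True
--
--     # Domain validation
--     if '.' in target and len(target.split('.')) >= 2:
--         return True
--
--     return False
-- ===== SOURCE B (Python) =====
-- def _is_valid_target(target: str) -> bool: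
--     """Validate target format: URL prefix, or anything containing a dot."""
--     return target.startswith(('http://', 'https://')) or ('.' in target)
-- ===== Notes on version B (the rewrite author's own statement) =====
-- stated objective: simpler
-- what changed: Collapsed A's three-branch validation (split-based IP parsing plus split-length domain check) into a single boolean expression: the IP branch is subsumed by the dot test (a dotted numeric IP contains a dot) and the split-length condition is equivalent to dot membership, so B is just a startswith-prefix test or a dot-membership test, with no split and no int parsing.
import Mathlib
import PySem

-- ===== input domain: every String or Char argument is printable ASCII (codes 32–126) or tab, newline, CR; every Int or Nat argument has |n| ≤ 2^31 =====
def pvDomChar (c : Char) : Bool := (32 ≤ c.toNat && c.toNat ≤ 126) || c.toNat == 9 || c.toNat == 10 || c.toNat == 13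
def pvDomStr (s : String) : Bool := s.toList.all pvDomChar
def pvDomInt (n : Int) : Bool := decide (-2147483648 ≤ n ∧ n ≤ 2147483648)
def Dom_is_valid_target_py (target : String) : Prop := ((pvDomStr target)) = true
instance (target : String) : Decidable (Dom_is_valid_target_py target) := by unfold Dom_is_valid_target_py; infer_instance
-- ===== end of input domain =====

-- B collapses A's split-based IP and domain branches into one boolean: URL prefix or dot-membership (simpler, same values).


-- ===== PORT A =====
def is_valid_target_py (target : String) : Bool :=
  if PySem.Str.startswith target "http://" || PySem.Str.startswith target "https://" then
    true
  else
    -- parts = target.split('.')   (sep nonempty, so split? always returns some)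
    let parts : List String := (PySem.Str.split? target ".").getD []
    if parts.length == 4 && parts.all (fun part =>
         PySem.Str.strIsdigit part &&
           (match PySem.Int.ofStr? part with
            | some n => decide (0 <= n) && decide (n <= 255)
            | none => false)) then
      true
    else if PySem.Str.isIn "." target && decide (2 <= ((PySem.Str.split? target ".").getD []).length) then
      true
    else
      false

-- ===== PORT B =====
def is_valid_target_py_alt (target : String) : Bool :=
  PySem.Str.startswith target "http://" || PySem.Str.startswith target "https://" ||
    PySem.Str.isIn "." target

-- ===== PRECONDITION & SPEC =====
def Spec_is_valid_target_py (target : String) (out : Bool) : Prop := out = is_valid_target_py_alt target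
instance (target : String) (out : Bool) : Decidable (Spec_is_valid_target_py target out) := by unfold Spec_is_valid_target_py; infer_instance

-- ===== CLAIM (what is proved, stated in full; the proofs are below) =====
def Claim_equal_is_valid_target_py : Prop := ∀ (target : String), Dom_is_valid_target_py target → Spec_is_valid_target_py target (is_valid_target_py target)

-- ===== LEMMAS AND PROOFS =====

-- go always produces at least acc.length + 1 pieces
theorem pv_go_len_ge (fuel : Nat) : ∀ (l cur : List Char) (acc : List (List Char)),
    l.length < fuel →
    acc.length + 1 ≤ (PySem.Chars.splitOn.go ['.'] fuel l cur acc).length := by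
  induction fuel with
  | zero => intro l cur acc h; omega
  | succ fuel ih =>
    intro l cur acc h
    match l with
    | [] => simp [PySem.Chars.splitOn.go]
    | c :: rest =>
      rw [PySem.Chars.splitOn.go]
      split
      · have := ih (List.drop 1 (c :: rest)) [] (cur.reverse :: acc)
          (by simp at h ⊢; omega)
        simp at this ⊢
        omega
      · exact ih rest (c :: cur) acc (by simp at h ⊢; omega)

-- go yields at least acc.length + 2 pieces iff the separator occurs in the remaining input
theorem pv_go_len_iff (fuel : Nat) : ∀ (l cur : List Char) (acc : List (List Char)),
    l.length < fuel →
    (acc.length + 2 ≤ (PySem.Chars.splitOn.go ['.'] fuel l cur acc).length ↔ ['.'] <:+: l) := by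
  induction fuel with
  | zero => intro l cur acc h; omega
  | succ fuel ih =>
    intro l cur acc h
    match l with
    | [] =>
      simp [PySem.Chars.splitOn.go]
    | c :: rest =>
      rw [PySem.Chars.splitOn.go]
      split
      · rename_i hpre
        constructor
        · intro _
          exact List.infix_cons_iff.2 (Or.inl (List.isPrefixOf_iff_prefix.1 hpre))
        · intro _
          have := pv_go_len_ge fuel (List.drop 1 (c :: rest)) [] (cur.reverse :: acc)
            (by simp at h ⊢; omega)
          simpa using this
      · rename_i hpre
        rw [ih rest (c :: cur) acc (by simp at h ⊢; omega)]
        rw [List.infix_cons_iff]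
        constructor
        · exact Or.inr
        · rintro (hp | hi)
          · exact absurd (List.isPrefixOf_iff_prefix.2 hp) hpre
          · exact hi

theorem pv_splitOn_len_iff (s : List Char) :
    2 ≤ (PySem.Chars.splitOn s ['.']).length ↔ PySem.Chars.isIn ['.'] s = true := by
  rw [PySem.Chars.isIn_iff_infix, PySem.Chars.splitOn]
  have := pv_go_len_iff (s.length + 1) s [] [] (by omega)
  simpa using this


-- ===== VERDICT (by name: the statement is the Claim_ definition above) =====
theorem is_valid_target_py_spec : Claim_equal_is_valid_target_py := by
  intro target _
  unfold Spec_is_valid_target_py is_valid_target_py is_valid_target_py_alt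
  have hsplit : (PySem.Str.split? target ".").getD [] =
      (PySem.Chars.splitOn target.toList ['.']).map String.ofList := by
    simp [PySem.Str.split?, PySem.Chars.split?]
  simp only [hsplit, pysem, List.length_map]
  by_cases hp : (PySem.Chars.startswith target.toList ['h','t','t','p',':','/','/'] ||
      PySem.Chars.startswith target.toList ['h','t','t','p','s',':','/','/']) = true
  · simp [hp]
  · have hp' : PySem.Chars.startswith target.toList ['h','t','t','p',':','/','/'] = false ∧
        PySem.Chars.startswith target.toList ['h','t','t','p','s',':','/','/'] = false := by
      simpa using hp
    by_cases hin : PySem.Chars.isIn ['.'] target.toList = true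
    · have hlen : 2 ≤ (PySem.Chars.splitOn target.toList ['.']).length :=
        (pv_splitOn_len_iff _).2 hin
      simp [hp'.1, hp'.2, hin, hlen]
    · have hlen : ¬ 2 ≤ (PySem.Chars.splitOn target.toList ['.']).length := by
        rw [pv_splitOn_len_iff]; exact hin
      have h4 : (PySem.Chars.splitOn target.toList ['.']).length ≠ 4 := by omega
      simp [hp'.1, hp'.2, Bool.eq_false_iff.2 hin, h4]
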